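-- pv_equiv track=rewrite | github.com/paloblanco/adventofcode2021 | day19/day19.py | get_cube_rotations
-- ===== SOURCE A (Python) =====
-- from typing import Generator
--
-- def get_cube_rotations(cube: list[tuple[int,int,int]]) -> Generator[list[tuple[int,int,int]],None,None]:
--     # generator that yields all 24 orientations of the points in cube around the origin (0,0,0)
--     # orientations do not include reflections
--     # twist around x-axis
--     for _ in range(4):
--         cube = [(x,-z,y) for x,y,z in cube]
--         # twist around y-axis
--         for _ in range(4):
--             cube = [(z,y,-x) for x,y,z in cube]
--             yield cube
--     # twist around z-axis
--     for _ in range(4):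
--         cube = [(-y,x,z) for x,y,z in cube]
--         if _%2 == 1: continue
--         # twist around y-axis
--         for _ in range(4):
--             cube = [(z,y,-x) for x,y,z in cube]
--             yield cube
-- ===== SOURCE B (Python) =====
-- def get_cube_rotations(cube):
--     # Phase 1: enumerate the 24 orientation matrices (rows of a 3x3 integer
--     # matrix), mirroring the twist loop structure on a single matrix state.
--     def tx(m): r0, r1, r2 = m; return (r0, (-r2[0], -r2[1], -r2[2]), r1)
--     def ty(m): r0, r1, r2 = m; return (r2, r1, (-r0[0], -r0[1], -r0[2]))
--     def tz(m): r0, r1, r2 = m; return ((-r1[0], -r1[1], -r1[2]), r0, r2)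
--     mats = []
--     m = ((1, 0, 0), (0, 1, 0), (0, 0, 1))
--     for _ in range(4):
--         m = tx(m)
--         for _ in range(4):
--             m = ty(m)
--             mats.append(m)
--     for i in range(4):
--         m = tz(m)
--         if i % 2 == 1:
--             continue
--         for _ in range(4):
--             m = ty(m)
--             mats.append(m)
--     # Phase 2: apply each stored matrix to the original points.
--     for r0, r1, r2 in mats:
--         yield [(r0[0]*x + r0[1]*y + r0[2]*z,
--                 r1[0]*x + r1[1]*y + r1[2]*z,
--                 r2[0]*x + r2[1]*y + r2[2]*z) for x, y, z in cube]
-- ===== Notes on version B (the rewrite author's own statement) =====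
-- stated objective: alternative
-- what changed: B first enumerates the 24 orientations as 3x3 integer rotation matrices (running the twist loops on a single matrix state), then in a second pass applies each stored matrix to the original point list, instead of A's repeated in-place rewriting of the whole point cloud.
import Mathlib
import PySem

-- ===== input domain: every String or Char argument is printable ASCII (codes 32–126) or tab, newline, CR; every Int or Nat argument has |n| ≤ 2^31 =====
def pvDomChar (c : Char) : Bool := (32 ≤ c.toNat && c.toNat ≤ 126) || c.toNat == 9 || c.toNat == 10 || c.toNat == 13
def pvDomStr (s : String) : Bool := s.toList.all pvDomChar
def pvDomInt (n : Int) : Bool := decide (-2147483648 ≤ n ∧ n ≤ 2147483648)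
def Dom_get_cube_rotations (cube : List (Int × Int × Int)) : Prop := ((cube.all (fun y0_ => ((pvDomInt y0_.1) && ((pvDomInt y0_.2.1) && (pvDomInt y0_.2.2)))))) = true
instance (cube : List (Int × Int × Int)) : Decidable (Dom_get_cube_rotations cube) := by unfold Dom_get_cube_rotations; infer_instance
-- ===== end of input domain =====

-- B enumerates the 24 rotations as 3x3 matrices first (same twist-loop shape on
-- a matrix state), then applies each matrix to the original points in a second
-- pass; A repeatedly rewrites the whole point cloud in place.

-- ===== PORT A =====
-- state: (current cube, list of yielded cubes)
def get_cube_rotations (cube : List (Int × Int × Int)) : List (List (Int × Int × Int)) :=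
  let s1 := (List.range 4).foldl
    (fun (st : List (Int × Int × Int) × List (List (Int × Int × Int))) _ =>
      let c := st.1.map (fun p => (p.1, -p.2.2, p.2.1))        -- twist around x-axis
      (List.range 4).foldl
        (fun st2 _ =>
          let c2 := st2.1.map (fun p => (p.2.2, p.2.1, -p.1))  -- twist around y-axis
          (c2, st2.2 ++ [c2]))                                 -- yield
        (c, st.2))
    (cube, [])
  let s2 := (List.range 4).foldl
    (fun (st : List (Int × Int × Int) × List (List (Int × Int × Int))) i =>
      let c := st.1.map (fun p => (-p.2.1, p.1, p.2.2))        -- twist around z-axis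
      if i % 2 == 1 then (c, st.2)                             -- continue
      else (List.range 4).foldl
        (fun st2 _ =>
          let c2 := st2.1.map (fun p => (p.2.2, p.2.1, -p.1))  -- twist around y-axis
          (c2, st2.2 ++ [c2]))                                 -- yield
        (c, st.2))
    s1
  s2.2

-- ===== PORT B =====
-- a 3x3 integer matrix as three rows
def pvRow : Type := Int × Int × Int
def pvMat : Type := pvRow × pvRow × pvRow
def pvNegRow (r : pvRow) : pvRow := (-r.1, -r.2.1, -r.2.2)
def pvTx (m : pvMat) : pvMat := (m.1, pvNegRow m.2.2, m.2.1)
def pvTy (m : pvMat) : pvMat := (m.2.2, m.2.1, pvNegRow m.1)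
def pvTz (m : pvMat) : pvMat := (pvNegRow m.2.1, m.1, m.2.2)
def pvDot (r : pvRow) (p : Int × Int × Int) : Int := r.1 * p.1 + r.2.1 * p.2.1 + r.2.2 * p.2.2
def pvApply (m : pvMat) (p : Int × Int × Int) : Int × Int × Int :=
  (pvDot m.1 p, pvDot m.2.1 p, pvDot m.2.2 p)

def get_cube_rotations_alt (cube : List (Int × Int × Int)) : List (List (Int × Int × Int)) :=
  -- Phase 1: the 24 orientation matrices
  let s1 := (List.range 4).foldl
    (fun (st : pvMat × List pvMat) _ =>
      let m := pvTx st.1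
      (List.range 4).foldl
        (fun st2 _ =>
          let m2 := pvTy st2.1
          (m2, st2.2 ++ [m2]))
        (m, st.2))
    (((1,0,0),(0,1,0),(0,0,1)), [])
  let s2 := (List.range 4).foldl
    (fun (st : pvMat × List pvMat) i =>
      let m := pvTz st.1
      if i % 2 == 1 then (m, st.2)
      else (List.range 4).foldl
        (fun st2 _ =>
          let m2 := pvTy st2.1
          (m2, st2.2 ++ [m2]))
        (m, st.2))
    s1
  -- Phase 2: apply each stored matrix to the original points
  s2.2.map (fun m => cube.map (pvApply m))

-- ===== PRECONDITION & SPEC =====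
def Spec_get_cube_rotations (cube : List (Int × Int × Int)) (out : List (List (Int × Int × Int))) : Prop := out = get_cube_rotations_alt cube
instance (cube : List (Int × Int × Int)) (out : List (List (Int × Int × Int))) : Decidable (Spec_get_cube_rotations cube out) := by unfold Spec_get_cube_rotations; infer_instance

-- ===== CLAIM (what is proved, stated in full; the proofs are below) =====
def Claim_equal_get_cube_rotations : Prop := ∀ (cube : List (Int × Int × Int)), Dom_get_cube_rotations cube → Spec_get_cube_rotations cube (get_cube_rotations cube)

-- ===== LEMMAS AND PROOFS =====
-- pointwise: a coordinate twist of the image of m is the image of the twisted matrix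
theorem pv_tx (cube : List (Int × Int × Int)) (m : pvMat) :
    (cube.map (pvApply m)).map (fun p => (p.1, -p.2.2, p.2.1)) = cube.map (pvApply (pvTx m)) := by
  simp only [List.map_map]
  refine List.map_congr_left (fun p _ => ?_)
  obtain ⟨a, b, c⟩ := p
  obtain ⟨⟨_,_,_⟩, ⟨_,_,_⟩, ⟨_,_,_⟩⟩ := m
  simp only [Function.comp_apply, pvApply, pvDot, pvTx, pvNegRow, Prod.mk.injEq]
  repeat' constructor
  all_goals ring

theorem pv_ty (cube : List (Int × Int × Int)) (m : pvMat) :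
    (cube.map (pvApply m)).map (fun p => (p.2.2, p.2.1, -p.1)) = cube.map (pvApply (pvTy m)) := by
  simp only [List.map_map]
  refine List.map_congr_left (fun p _ => ?_)
  obtain ⟨a, b, c⟩ := p
  obtain ⟨⟨_,_,_⟩, ⟨_,_,_⟩, ⟨_,_,_⟩⟩ := m
  simp only [Function.comp_apply, pvApply, pvDot, pvTy, pvNegRow, Prod.mk.injEq]
  repeat' constructor
  all_goals ring

theorem pv_tz (cube : List (Int × Int × Int)) (m : pvMat) :
    (cube.map (pvApply m)).map (fun p => (-p.2.1, p.1, p.2.2)) = cube.map (pvApply (pvTz m)) := by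
  simp only [List.map_map]
  refine List.map_congr_left (fun p _ => ?_)
  obtain ⟨a, b, c⟩ := p
  obtain ⟨⟨_,_,_⟩, ⟨_,_,_⟩, ⟨_,_,_⟩⟩ := m
  simp only [Function.comp_apply, pvApply, pvDot, pvTz, pvNegRow, Prod.mk.injEq]
  repeat' constructor
  all_goals ring

-- the identity matrix acts as the identity on the cube
theorem pv_id (cube : List (Int × Int × Int)) :
    cube.map (pvApply ((1,0,0),(0,1,0),(0,0,1))) = cube := by
  refine List.map_congr_left (fun p _ => ?_) |>.trans cube.map_id
  obtain ⟨a, b, c⟩ := p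
  simp [pvApply, pvDot]

-- a fold preserves any relation its step preserves
theorem pv_foldl_rel {α β γ : Type} (R : α → β → Prop) (f : α → γ → α) (g : β → γ → β)
    (h : ∀ a b n, R a b → R (f a n) (g b n)) :
    ∀ (l : List γ) (a : α) (b : β), R a b → R (l.foldl f a) (l.foldl g b) := by
  intro l
  induction l with
  | nil => intro a b hab; exact hab
  | cons x xs ih => intro a b hab; exact ih _ _ (h a b x hab)

-- the simulation relation between A's state and B's state
def pvR (cube : List (Int × Int × Int))
    (sA : List (Int × Int × Int) × List (List (Int × Int × Int)))
    (sB : pvMat × List pvMat) : Prop :=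
  sA.1 = cube.map (pvApply sB.1) ∧ sA.2 = sB.2.map (fun m => cube.map (pvApply m))

theorem pv_inner (cube : List (Int × Int × Int)) (sA : List (Int × Int × Int) × List (List (Int × Int × Int)))
    (sB : pvMat × List pvMat) (n : Nat) (h : pvR cube sA sB) :
    pvR cube
      ((fun st2 (_ : Nat) =>
          let c2 := st2.1.map (fun p : Int × Int × Int => (p.2.2, p.2.1, -p.1))
          (c2, st2.2 ++ [c2])) sA n)
      ((fun st2 (_ : Nat) =>
          let m2 := pvTy st2.1
          (m2, st2.2 ++ [m2])) sB n) := by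
  obtain ⟨h1, h2⟩ := h
  refine ⟨?_, ?_⟩
  · simp only [h1, pv_ty]
  · simp only [h1, h2, pv_ty, List.map_append, List.map]

theorem pv_main (cube : List (Int × Int × Int)) :
    get_cube_rotations cube = get_cube_rotations_alt cube := by
  unfold get_cube_rotations get_cube_rotations_alt
  have step1 : ∀ sA sB n, pvR cube sA sB → pvR cube
      ((fun (st : List (Int × Int × Int) × List (List (Int × Int × Int))) (_ : Nat) =>
        let c := st.1.map (fun p : Int × Int × Int => (p.1, -p.2.2, p.2.1))
        (List.range 4).foldl
          (fun st2 _ =>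
            let c2 := st2.1.map (fun p : Int × Int × Int => (p.2.2, p.2.1, -p.1))
            (c2, st2.2 ++ [c2]))
          (c, st.2)) sA n)
      ((fun (st : pvMat × List pvMat) (_ : Nat) =>
        let m := pvTx st.1
        (List.range 4).foldl
          (fun st2 _ =>
            let m2 := pvTy st2.1
            (m2, st2.2 ++ [m2]))
          (m, st.2)) sB n) := by
    intro sA sB n h
    refine pv_foldl_rel (pvR cube) _ _ (pv_inner cube) _ _ _ ?_
    exact ⟨by simp only [h.1, pv_tx], h.2⟩
  have step2 : ∀ sA sB n, pvR cube sA sB → pvR cube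
      ((fun (st : List (Int × Int × Int) × List (List (Int × Int × Int))) (i : Nat) =>
        let c := st.1.map (fun p : Int × Int × Int => (-p.2.1, p.1, p.2.2))
        if i % 2 == 1 then (c, st.2)
        else (List.range 4).foldl
          (fun st2 _ =>
            let c2 := st2.1.map (fun p : Int × Int × Int => (p.2.2, p.2.1, -p.1))
            (c2, st2.2 ++ [c2]))
          (c, st.2)) sA n)
      ((fun (st : pvMat × List pvMat) (i : Nat) =>
        let m := pvTz st.1
        if i % 2 == 1 then (m, st.2)
        else (List.range 4).foldl
          (fun st2 _ =>
            let m2 := pvTy st2.1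
            (m2, st2.2 ++ [m2]))
          (m, st.2)) sB n) := by
    intro sA sB n h
    by_cases hn : n % 2 == 1
    · simp only [hn, if_pos]
      exact ⟨by simp only [h.1, pv_tz], h.2⟩
    · simp only [hn, Bool.false_eq_true, if_false]
      refine pv_foldl_rel (pvR cube) _ _ (pv_inner cube) _ _ _ ?_
      exact ⟨by simp only [h.1, pv_tz], h.2⟩
  have h0 : pvR cube (cube, ([] : List (List (Int × Int × Int))))
      ((((1,0,0),(0,1,0),(0,0,1)) : pvMat), ([] : List pvMat)) :=
    ⟨(pv_id cube).symm, rfl⟩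
  have h1 := pv_foldl_rel (pvR cube) _ _ step1 (List.range 4) _ _ h0
  have h2 := pv_foldl_rel (pvR cube) _ _ step2 (List.range 4) _ _ h1
  exact h2.2
-- ===== VERDICT (by name: the statement is the Claim_ definition above) =====
theorem get_cube_rotations_spec : Claim_equal_get_cube_rotations := by
  intro cube _
  unfold Spec_get_cube_rotations
  exact pv_main cube
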